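-- pv_equiv track=rewrite | github.com/astral451/AdventOfCode | 2022/day1/elf_calorie_counter.py | group_by_elf
-- ===== SOURCE A (Python) =====
-- def group_by_elf(calorie_data:list) ->dict:
--     elf_data = {}
--     value_data = {}
--
--     elf_idx = 0
--     _current_val = 0
--     for value in calorie_data:
--         if value:
--             value = int(value)
--             _current_val += value
--         else:
--             value_data.setdefault(_current_val, [] ).append(elf_idx)
--             elf_data[elf_idx] = _current_val
--             _current_val = 0
--             elf_idx += 1
--
--     return elf_data, value_data
-- ===== SOURCE B (Python) =====
-- def group_by_elf(calorie_data: list) -> dict: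
--     # Phase 1: one pass collapsing the raw entries to an ordered list of per-elf sums.
--     groups = []
--     total = 0
--     for value in calorie_data:
--         if value:
--             total += int(value)
--         else:
--             groups.append(total)
--             total = 0
--     # Phase 2: build both outputs from the group list.
--     elf_data = {i: s for i, s in enumerate(groups)}
--     value_data = {}
--     for i, s in enumerate(groups):
--         value_data.setdefault(s, []).append(i)
--     return elf_data, value_data
-- ===== Notes on version B (the rewrite author's own statement) =====
-- stated objective: simpler
-- what changed: B separates the work into phases: one pass reduces the entries to an ordered list of per-elf sums, then elf_data and value_data are each built by a plain pass over that list, instead of A's single loop updating both dicts interleaved with the summing.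
import Mathlib
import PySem

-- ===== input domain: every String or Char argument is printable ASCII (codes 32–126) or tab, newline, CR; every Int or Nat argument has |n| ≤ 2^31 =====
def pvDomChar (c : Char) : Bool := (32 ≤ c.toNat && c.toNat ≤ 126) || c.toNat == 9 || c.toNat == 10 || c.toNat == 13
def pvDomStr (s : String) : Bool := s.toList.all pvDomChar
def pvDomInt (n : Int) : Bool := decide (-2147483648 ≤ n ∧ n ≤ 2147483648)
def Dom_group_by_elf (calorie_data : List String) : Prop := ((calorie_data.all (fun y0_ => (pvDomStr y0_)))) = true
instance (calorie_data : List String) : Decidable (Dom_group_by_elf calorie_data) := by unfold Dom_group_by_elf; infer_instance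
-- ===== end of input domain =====

-- One line: B replaces A's single loop that updates both dicts interleaved with the summing
-- by a pass producing the ordered list of per-elf sums plus two separate dict-building passes.

-- ===== PORT A =====
-- state: (elf_data, value_data, elf_idx, _current_val); (ofStr? …).getD 0 — none (ValueError) excluded by Pre_
def group_by_elf (calorie_data : List String) : (List (Int × Int)) × (List (Int × List Int)) :=
  let st := calorie_data.foldl
    (fun (st : PySem.Dict Int Int × PySem.Dict Int (List Int) × Int × Int) value =>
      let (ed, vd, idx, cur) := st
      if value ≠ "" then
        (ed, vd, idx, cur + (PySem.Int.ofStr? value).getD 0)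
      else
        (ed.insert idx cur, vd.modify cur [] (· ++ [idx]), idx + 1, 0))
    (PySem.Dict.empty, PySem.Dict.empty, 0, 0)
  (st.1.items, st.2.1.items)

-- ===== PORT B =====
-- Phase 1: collapse to the ordered list of per-elf sums
def gbeGroups (calorie_data : List String) : List Int × Int :=
  calorie_data.foldl
    (fun (st : List Int × Int) value =>
      if value ≠ "" then (st.1, st.2 + (PySem.Int.ofStr? value).getD 0)
      else (st.1 ++ [st.2], 0))
    ([], 0)

def group_by_elf_alt (calorie_data : List String) : (List (Int × Int)) × (List (Int × List Int)) :=
  let groups := (gbeGroups calorie_data).1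
  let elf_data := (PySem.List.enumerate groups 0).foldl
    (fun (d : PySem.Dict Int Int) p => d.insert p.1 p.2) PySem.Dict.empty
  let value_data := (PySem.List.enumerate groups 0).foldl
    (fun (d : PySem.Dict Int (List Int)) p => d.modify p.2 [] (· ++ [p.1])) PySem.Dict.empty
  (elf_data.items, value_data.items)

-- ===== PRECONDITION & SPEC =====
-- Pre_ excludes exactly the inputs on which A raises ValueError: a nonempty entry int() rejects.
def Pre_group_by_elf (calorie_data : List String) : Prop :=
  (calorie_data.all (fun s => s == "" || (PySem.Int.ofStr? s).isSome)) = true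
instance (calorie_data : List String) : Decidable (Pre_group_by_elf calorie_data) := by
  unfold Pre_group_by_elf; infer_instance
def pvWitness_group_by_elf : List String := ["1", "2", "", "30", "", ""]

def Spec_group_by_elf (calorie_data : List String) (out : (List (Int × Int)) × (List (Int × List Int))) : Prop := out = group_by_elf_alt calorie_data
instance (calorie_data : List String) (out : (List (Int × Int)) × (List (Int × List Int))) : Decidable (Spec_group_by_elf calorie_data out) := by unfold Spec_group_by_elf; infer_instance

-- ===== CLAIM (what is proved, stated in full; the proofs are below) =====
def Claim_equal_group_by_elf : Prop := ∀ (calorie_data : List String), Dom_group_by_elf calorie_data → Pre_group_by_elf calorie_data → Spec_group_by_elf calorie_data (group_by_elf calorie_data)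

-- ===== LEMMAS AND PROOFS =====

-- the groups accumulator of B's first pass is a prefix: folding from (g, c) appends to g
theorem gbeGroups_acc (xs : List String) (g : List Int) (c : Int) :
    xs.foldl
      (fun (st : List Int × Int) value =>
        if value ≠ "" then (st.1, st.2 + (PySem.Int.ofStr? value).getD 0)
        else (st.1 ++ [st.2], 0)) (g, c)
    = (g ++ (xs.foldl
        (fun (st : List Int × Int) value =>
          if value ≠ "" then (st.1, st.2 + (PySem.Int.ofStr? value).getD 0)
          else (st.1 ++ [st.2], 0)) ([], c)).1,
       (xs.foldl
        (fun (st : List Int × Int) value =>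
          if value ≠ "" then (st.1, st.2 + (PySem.Int.ofStr? value).getD 0)
          else (st.1 ++ [st.2], 0)) ([], c)).2) := by
  induction xs generalizing g c with
  | nil => simp [List.foldl]
  | cons x xs ih =>
    by_cases hx : x ≠ ""
    · simp only [List.foldl, if_pos hx]
      exact ih g _
    · simp only [List.foldl, if_neg hx]
      rw [ih (g ++ [c]) 0, ih ([] ++ [c]) 0]
      simp

-- A's interleaved loop equals: run B's grouping pass, then replay the two dict updates over it
theorem gbe_main (xs : List String) (ed : PySem.Dict Int Int) (vd : PySem.Dict Int (List Int))
    (idx cur : Int) :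
    xs.foldl
      (fun (st : PySem.Dict Int Int × PySem.Dict Int (List Int) × Int × Int) value =>
        let (ed, vd, idx, cur) := st
        if value ≠ "" then
          (ed, vd, idx, cur + (PySem.Int.ofStr? value).getD 0)
        else
          (ed.insert idx cur, vd.modify cur [] (· ++ [idx]), idx + 1, 0))
      (ed, vd, idx, cur)
    = (let gs := (xs.foldl
        (fun (st : List Int × Int) value =>
          if value ≠ "" then (st.1, st.2 + (PySem.Int.ofStr? value).getD 0)
          else (st.1 ++ [st.2], 0)) ([], cur)).1
       ((PySem.List.enumerate gs idx).foldl
          (fun (d : PySem.Dict Int Int) p => d.insert p.1 p.2) ed,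
        (PySem.List.enumerate gs idx).foldl
          (fun (d : PySem.Dict Int (List Int)) p => d.modify p.2 [] (· ++ [p.1])) vd,
        idx + gs.length,
        (xs.foldl
          (fun (st : List Int × Int) value =>
            if value ≠ "" then (st.1, st.2 + (PySem.Int.ofStr? value).getD 0)
            else (st.1 ++ [st.2], 0)) ([], cur)).2)) := by
  induction xs generalizing ed vd idx cur with
  | nil => simp [List.foldl]
  | cons x xs ih =>
    by_cases hx : x ≠ ""
    · simp only [List.foldl, if_pos hx]
      exact ih ed vd idx _
    · simp only [List.foldl, if_neg hx]
      rw [ih (ed.insert idx cur) (vd.modify cur [] (· ++ [idx])) (idx + 1) 0,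
          gbeGroups_acc xs ([] ++ [cur]) 0]
      simp [PySem.List.enumerate_cons, add_comm, add_assoc]

-- ===== VERDICT (by name: the statement is the Claim_ definition above) =====
theorem group_by_elf_spec : Claim_equal_group_by_elf := by
  intro xs _ _
  show group_by_elf xs = group_by_elf_alt xs
  unfold group_by_elf group_by_elf_alt gbeGroups
  rw [gbe_main]
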